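-- pv_equiv track=rewrite | github.com/donguyengiac/MITOCW6101 | ladder/subword.py | helper
-- ===== SOURCE A (Python) =====
-- def helper(word):
--     """
--     >>> result = set(helper("cat"))
--     >>> expected = {'', 'c', 'a', 't',
--     ...             'ca', 'ct', 'ac', 'at', 'tc', 'ta',
--     ...             'cat', 'cta', 'tca', 'tac', 'atc', 'act'}
--     >>> result == expected
--     True
--     """
--
--     if not word:
--         yield ''
--         return
--
--     #out = set()
--     first = word[0]
--     rest = word[1:]
--
--     for w in helper(rest):
--         yield w
--         for ix in range(len(w) + 1):
--             yield (w[ix:] + first + w[:ix])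
-- ===== SOURCE B (Python) =====
-- def helper(word):
--     results = ['']
--     for first in reversed(word):
--         new = []
--         for w in results:
--             new.append(w)
--             new.extend(w[ix:] + first + w[:ix] for ix in range(len(w) + 1))
--         results = new
--     yield from results
-- ===== Notes on version B (the rewrite author's own statement) =====
-- stated objective: alternative
-- what changed: Replaced the recursive generator (recurse on the tail, then interleave the first character into each subword) by an explicit iterative accumulator: start from [''] and fold over the characters of word in reverse, rebuilding the results list with each word followed by its insertion-rotations; the whole list is materialized and yielded at the end, producing the same sequence with the same order and duplicate multiplicity.
import Mathlib
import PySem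

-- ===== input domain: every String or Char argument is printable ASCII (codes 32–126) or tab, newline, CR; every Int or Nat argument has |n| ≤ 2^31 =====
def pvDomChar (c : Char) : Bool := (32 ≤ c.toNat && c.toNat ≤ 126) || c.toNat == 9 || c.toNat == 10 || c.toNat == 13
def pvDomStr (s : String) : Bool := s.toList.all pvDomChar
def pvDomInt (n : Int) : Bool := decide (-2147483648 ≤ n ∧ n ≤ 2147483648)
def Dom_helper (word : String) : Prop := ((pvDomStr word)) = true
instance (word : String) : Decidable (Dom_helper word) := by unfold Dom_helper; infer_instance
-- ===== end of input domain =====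

-- B replaces A's recursive generator by an iterative accumulator folded over the reversed word (objective: alternative decomposition, same cost).


-- ===== PORT A =====
-- A recursive generator: the yields of one call, collected in order, are a list.
def helperA (cs : List Char) : List (List Char) :=
  match cs with
  | [] => [[]]
  | first :: rest =>
      (helperA rest).flatMap (fun w =>
        w :: (PySem.List.pyRange 0 ((w.length : Int) + 1) 1).map
          (fun ix => PySem.List.slice w (some ix) none ++ [first] ++ PySem.List.slice w none (some ix)))

def helper (word : String) : List String :=
  (helperA word.toList).map (fun w => String.ofList w)

-- ===== PORT B =====
-- inner loop body of Source B: new.append(w); new.extend(w[ix:]+first+w[:ix] for ix in range(len(w)+1))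
-- (ix is a nonnegative index, so w[ix:] / w[:ix] are exactly List.drop / List.take)
def altStep (first : Char) (results : List (List Char)) : List (List Char) :=
  results.foldl
    (fun new w =>
      new ++ (w :: (List.range (w.length + 1)).map (fun ix => w.drop ix ++ first :: w.take ix)))
    []

def helper_alt (word : String) : List String :=
  ((word.toList.reverse).foldl (fun results first => altStep first results) [[]]).map
    (fun w => String.ofList w)

-- ===== PRECONDITION & SPEC =====
def Spec_helper (word : String) (out : List String) : Prop := out = helper_alt word
instance (word : String) (out : List String) : Decidable (Spec_helper word out) := by unfold Spec_helper; infer_instance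

-- ===== CLAIM (what is proved, stated in full; the proofs are below) =====
def Claim_equal_helper : Prop := ∀ (word : String), Dom_helper word → Spec_helper word (helper word)

-- ===== LEMMAS AND PROOFS =====

-- A's inner rotation list equals B's drop/take rotation list.
theorem rotations_eq (first : Char) (w : List Char) :
    (PySem.List.pyRange 0 ((w.length : Int) + 1) 1).map
        (fun ix => PySem.List.slice w (some ix) none ++ [first] ++ PySem.List.slice w none (some ix))
      = (List.range (w.length + 1)).map (fun ix => w.drop ix ++ first :: w.take ix) := by
  rw [PySem.List.pyRange_one, List.map_map]
  have : ((((w.length : Int) + 1 - 0)).toNat) = w.length + 1 := by omega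
  rw [this]
  refine List.map_congr_left ?_
  intro k _
  simp [PySem.List.slice_from_natCast, PySem.List.slice_to_natCast]

-- B's step applied to a results list is A's flatMap body.
theorem altStep_eq (first : Char) (res : List (List Char)) :
    altStep first res
      = res.flatMap (fun w =>
          w :: (PySem.List.pyRange 0 ((w.length : Int) + 1) 1).map
            (fun ix => PySem.List.slice w (some ix) none ++ [first] ++ PySem.List.slice w none (some ix))) := by
  unfold altStep
  rw [PySem.List.foldl_append_eq_flatMap]
  simp only [List.nil_append]
  simp only [List.flatMap]
  refine congrArg List.flatten (List.map_congr_left fun w _ => ?_)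
  rw [rotations_eq]

theorem helperA_eq_fold (cs : List Char) :
    helperA cs = (cs.reverse).foldl (fun results first => altStep first results) [[]] := by
  rw [List.foldl_reverse]
  induction cs with
  | nil => rfl
  | cons c rest ih =>
      rw [List.foldr_cons, ← ih, helperA, altStep_eq]

-- ===== VERDICT (by name: the statement is the Claim_ definition above) =====
theorem helper_spec : Claim_equal_helper := by
  intro word _
  unfold Spec_helper helper helper_alt
  rw [helperA_eq_fold]
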